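-- pv_equiv track=rewrite | github.com/chorokdong/CodingTest | Programmers_Python/[Lv.1]프로그래머스_대충_만든_자판.py | solution
-- ===== SOURCE A (Python) =====
-- def solution(keymap, targets):
--     result = []
--     for target in targets:
--         value = []
--         for i in target:
--             num = float('inf')
--             for key in keymap:
--                 try:
--                     if num > key.index(i):
--                         num = key.index(i)
--                 except:
--                     continue
--             value.append(num + 1)
--         result.append(value)
--
--     final_result = []
--     for value in result:
--         change = [i for i, ele in enumerate(value) if ele == float('inf')]
--         if len(value) == len(change):
--             value = [-1]
--         else:
--             for i in range(len(value)):
--                 if value[i] == float('inf'):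
--                     value[i] = 0
--         final_result.append(sum(value))
--
--     return final_result
-- ===== SOURCE B (Python) =====
-- def solution(keymap, targets):
--     # Precompute minimal index per character across all keys, then one pass per target.
--     best = {}
--     for key in keymap:
--         for i, ch in enumerate(key):
--             if ch not in best or i < best[ch]:
--                 best[ch] = i
--     res = []
--     for target in targets:
--         total = 0
--         found = False
--         for ch in target:
--             if ch in best:
--                 total += best[ch] + 1
--                 found = True
--         res.append(total if found else -1)
--     return res
-- ===== Notes on version B (the rewrite author's own statement) =====
-- stated objective: faster
-- what changed: Replaces A's per-target-character rescans of the whole keymap (two str.index calls per key) and its separate inf-marking second phase by a single precomputed char->min-index dict and one accumulating pass per target with a found flag.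
import Mathlib
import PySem

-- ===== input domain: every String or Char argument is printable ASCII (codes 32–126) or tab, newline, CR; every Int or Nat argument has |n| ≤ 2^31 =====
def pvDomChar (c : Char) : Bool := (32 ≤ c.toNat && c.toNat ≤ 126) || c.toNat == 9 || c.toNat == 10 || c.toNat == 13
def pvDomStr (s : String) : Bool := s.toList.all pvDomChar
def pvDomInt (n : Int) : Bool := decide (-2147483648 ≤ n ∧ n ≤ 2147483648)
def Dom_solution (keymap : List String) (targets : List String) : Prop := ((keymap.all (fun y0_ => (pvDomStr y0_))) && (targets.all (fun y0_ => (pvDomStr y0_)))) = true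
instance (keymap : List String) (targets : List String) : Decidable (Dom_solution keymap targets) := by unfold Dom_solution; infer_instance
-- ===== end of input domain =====

-- B precomputes the per-character minimal keypad index once and does a single accumulating
-- pass per target (found flag), instead of A's keymap rescan per character plus a second
-- inf-marking phase; return values proved equal on all inputs.

-- ===== PORT A =====
-- num = float('inf') is represented as `none : Option Int`; num + 1 is Option.map (· + 1);
-- key.index(i) for the 1-char string i is the first index of the char in key
-- (ValueError = none): PySem.List.index? on key.toList — exact on every input.
def solution (keymap : List String) (targets : List String) : List Int :=
  let result : List (List (Option Int)) :=
    targets.foldl (fun res target =>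
      let value : List (Option Int) :=
        target.toList.foldl (fun value c =>
          let num : Option Int :=
            keymap.foldl (fun num key =>
              match PySem.List.index? key.toList c with
              | none => num  -- except: continue
              | some j =>
                match num with
                | none => some (j : Int)                               -- inf > j
                | some n => if (j : Int) < n then some (j : Int) else some n) none
          value ++ [num.map (· + 1)]) []
      res ++ [value]) []
  result.foldl (fun fr value =>
    -- change = [i for i, ele in enumerate(value) if ele == float('inf')]
    let change := ((PySem.List.enumerate value 0).filter (fun p => p.2.isNone)).map (·.1)
    if value.length = change.length then fr ++ [(-1 : Int)]
    else
      -- in-place loop replacing each inf by 0, then sum(value)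
      fr ++ [(value.map (fun o => o.getD 0)).sum]) []

-- ===== PORT B =====
def solution_alt (keymap : List String) (targets : List String) : List Int :=
  let best : PySem.Dict Char Int :=
    keymap.foldl (fun d key =>
      (PySem.List.enumerate key.toList 0).foldl (fun d p =>
        match PySem.Dict.get? d p.2 with
        | none => d.insert p.2 p.1
        | some v => if p.1 < v then d.insert p.2 p.1 else d) d) PySem.Dict.empty
  targets.foldl (fun res target =>
    let tf : Int × Bool :=
      target.toList.foldl (fun tf c =>
        match PySem.Dict.get? best c with
        | none => tf
        | some v => (tf.1 + (v + 1), true)) ((0 : Int), false)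
    res ++ [if tf.2 then tf.1 else (-1 : Int)]) []

-- ===== PRECONDITION & SPEC =====
def Spec_solution (keymap : List String) (targets : List String) (out : List Int) : Prop := out = solution_alt keymap targets
instance (keymap : List String) (targets : List String) (out : List Int) : Decidable (Spec_solution keymap targets out) := by unfold Spec_solution; infer_instance

-- ===== CLAIM (what is proved, stated in full; the proofs are below) =====
def Claim_equal_solution : Prop := ∀ (keymap : List String) (targets : List String), Dom_solution keymap targets → Spec_solution keymap targets (solution keymap targets)

-- ===== LEMMAS AND PROOFS =====

-- minimum of two Option Int, none = +infinity (ties agree with A's tie-keep-left test j < n)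
def mmin (a b : Option Int) : Option Int :=
  match a, b with
  | none, b => b
  | some n, none => some n
  | some n, some j => some (min n j)

lemma mmin_assoc (a b c : Option Int) : mmin (mmin a b) c = mmin a (mmin b c) := by
  cases a <;> cases b <;> cases c <;> simp [mmin, min_assoc]

lemma mmin_some_absorb (s : Int) (o : Option Int) (h : ∀ v ∈ o, s ≤ v) :
    mmin (some s) o = some s := by
  cases o with
  | none => rfl
  | some v =>
    simp only [Option.mem_def, Option.some.injEq, forall_eq'] at h
    simp [mmin]; omega

-- first index of c in l, offset by s (none if absent)
def fIdx (l : List Char) (s : Int) (c : Char) : Option Int :=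
  (PySem.List.index? l c).map (fun j => s + (j : Int))

lemma fIdx_mem_ge (l : List Char) (s : Int) (c : Char) (v : Int) (h : v ∈ fIdx l s c) : s ≤ v := by
  unfold fIdx at h
  cases hj : PySem.List.index? l c with
  | none => rw [hj] at h; simp at h
  | some j => rw [hj] at h; simp at h; omega

-- the dict-update step of B touches only key x, and sets it to the min of old value and s
lemma get?_step (d : PySem.Dict Char Int) (s : Int) (x c : Char) :
    (match PySem.Dict.get? d x with
     | none => d.insert x s
     | some v => if s < v then d.insert x s else d).get? c
    = if c = x then mmin (PySem.Dict.get? d x) (some s) else PySem.Dict.get? d c := by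
  cases hx : PySem.Dict.get? d x with
  | none => simp [PySem.Dict.get?_insert, mmin]
  | some v =>
    by_cases hcx : c = x
    · subst hcx
      rw [if_pos rfl]
      simp only [mmin]
      split_ifs with hs
      · rw [PySem.Dict.get?_insert_self]
        congr 1
        omega
      · rw [hx]
        congr 1
        omega
    · rw [if_neg hcx]
      show (if s < v then d.insert x s else d).get? c = d.get? c
      split_ifs with hs
      · rw [PySem.Dict.get?_insert]; simp [hcx]
      · rfl

lemma mmin_none_right (a : Option Int) : mmin a none = a := by cases a <;> rfl

lemma fIdx_nil (s : Int) (c : Char) : fIdx [] s c = none := rfl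

lemma fIdx_cons_self (x : Char) (xs : List Char) (s : Int) : fIdx (x :: xs) s x = some s := by
  unfold fIdx; rw [PySem.List.index?_cons_self]; simp

lemma fIdx_cons_ne (x c : Char) (xs : List Char) (s : Int) (h : x ≠ c) :
    fIdx (x :: xs) s c = fIdx xs (s + 1) c := by
  unfold fIdx; rw [PySem.List.index?_cons_of_ne xs h]
  cases PySem.List.index? xs c <;> simp
  omega

-- B's inner loop over one key: only key c changes, to the min with the first index of c
lemma get?_keyFold (l : List Char) (s : Int) (d : PySem.Dict Char Int) (c : Char) :
    ((PySem.List.enumerate l s).foldl (fun d p =>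
        match PySem.Dict.get? d p.2 with
        | none => d.insert p.2 p.1
        | some v => if p.1 < v then d.insert p.2 p.1 else d) d).get? c
    = mmin (PySem.Dict.get? d c) (fIdx l s c) := by
  induction l generalizing s d with
  | nil => simp [PySem.List.enumerate_nil, fIdx_nil, mmin_none_right]
  | cons x xs ih =>
    rw [PySem.List.enumerate_cons, List.foldl_cons, ih]
    rw [get?_step]
    by_cases hcx : c = x
    · subst hcx
      rw [if_pos rfl, fIdx_cons_self, mmin_assoc,
          mmin_some_absorb s _ (fun v hv => le_of_lt (by have := fIdx_mem_ge xs (s+1) c v hv; omega))]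
    · rw [if_neg hcx, fIdx_cons_ne x c xs s (fun h => hcx h.symm)]

-- B's whole dict-building loop, observed through get? at one char
lemma get?_bestFold (km : List String) (d : PySem.Dict Char Int) (c : Char) :
    (km.foldl (fun d key =>
        (PySem.List.enumerate key.toList 0).foldl (fun d p =>
          match PySem.Dict.get? d p.2 with
          | none => d.insert p.2 p.1
          | some v => if p.1 < v then d.insert p.2 p.1 else d) d) d).get? c
    = km.foldl (fun num key => mmin num (fIdx key.toList 0 c)) (PySem.Dict.get? d c) := by
  induction km generalizing d with
  | nil => rfl
  | cons key km ih => rw [List.foldl_cons, List.foldl_cons, ih, get?_keyFold]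

-- A's inner scan over the keymap is the same mmin fold
lemma aNum_eq (km : List String) (c : Char) (num : Option Int) :
    km.foldl (fun num key =>
      match PySem.List.index? key.toList c with
      | none => num
      | some j =>
        match num with
        | none => some (j : Int)
        | some n => if (j : Int) < n then some (j : Int) else some n) num
    = km.foldl (fun num key => mmin num (fIdx key.toList 0 c)) num := by
  induction km generalizing num with
  | nil => rfl
  | cons key km ih =>
    rw [List.foldl_cons, List.foldl_cons, ih]
    congr 1
    unfold fIdx
    cases hj : PySem.List.index? key.toList c with
    | none => cases num <;> rfl
    | some j =>
      cases num with
      | none => simp [mmin]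
      | some n =>
        simp [mmin, min_def]
        split_ifs <;> simp <;> omega

-- B's single pass over one target, closed form
lemma bTarget (g : Char → Option Int) (t : List Char) (tot : Int) (fnd : Bool) :
    t.foldl (fun tf c =>
      match g c with
      | none => tf
      | some v => (tf.1 + (v + 1), true)) (tot, fnd)
    = (tot + (t.map (fun c => ((g c).map (· + 1)).getD 0)).sum,
       fnd || t.any (fun c => (g c).isSome)) := by
  induction t generalizing tot fnd with
  | nil => simp
  | cons x xs ih =>
    rw [List.foldl_cons, List.map_cons, List.sum_cons, List.any_cons]
    cases hx : g x with
    | none => rw [ih]; simp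
    | some v => rw [ih]; simp; omega

-- length of A's `change` comprehension = count of inf entries
lemma change_len (v : List (Option Int)) (s : Int) :
    (((PySem.List.enumerate v s).filter (fun p => p.2.isNone)).map (·.1)).length
    = List.countP (fun o => o.isNone) v := by
  induction v generalizing s with
  | nil => simp [PySem.List.enumerate_nil]
  | cons o os ih =>
    rw [PySem.List.enumerate_cons]
    cases o <;> simp [ih]

-- A's two-phase treatment of one target = B's single pass, for any lookup g
lemma per_target (g : Char → Option Int) (t : List Char) :
    (if (t.map fun c => (g c).map (· + 1)).length =
        (((PySem.List.enumerate (t.map fun c => (g c).map (· + 1)) 0).filter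
            (fun p => p.2.isNone)).map (·.1)).length
     then (-1 : Int)
     else ((t.map fun c => (g c).map (· + 1)).map (fun o => o.getD 0)).sum)
    = (if (t.foldl (fun tf c =>
            match g c with
            | none => tf
            | some v => (tf.1 + (v + 1), true)) ((0 : Int), false)).2
       then (t.foldl (fun tf c =>
            match g c with
            | none => tf
            | some v => (tf.1 + (v + 1), true)) ((0 : Int), false)).1
       else (-1 : Int)) := by
  rw [bTarget g t 0 false, change_len]
  simp only [List.length_map, List.countP_map, List.map_map, Bool.false_or, zero_add,
             Function.comp_def]
  by_cases hall : ∀ c ∈ t, (g c).isNone = true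
  · have h1 : List.countP (fun c => ((g c).map (· + 1)).isNone) t = t.length := by
      rw [List.countP_eq_length]
      intro c hc
      have := hall c hc
      cases hgc : g c <;> simp_all
    have h2 : t.any (fun c => (g c).isSome) = false := by
      simp only [List.any_eq_false]
      intro c hc
      have := hall c hc
      cases hgc : g c <;> simp_all
    rw [h1, if_pos rfl, h2, if_neg (by simp)]
  · have h1 : ¬ t.length = List.countP (fun c => ((g c).map (· + 1)).isNone) t := by
      intro h
      apply hall
      intro c hc
      have := List.countP_eq_length.mp h.symm c hc
      cases hgc : g c <;> simp_all
    have h2 : t.any (fun c => (g c).isSome) = true := by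
      rw [List.any_eq_true]
      rcases not_forall.mp hall with ⟨c, hc⟩
      rcases Classical.not_imp.mp hc with ⟨hmem, hno⟩
      exact ⟨c, hmem, by cases hgc : g c <;> simp_all⟩
    rw [if_neg h1, h2, if_pos rfl]

-- push the branch inside A's final append so the loop-shape lemma applies
lemma ite_append (c : Prop) [Decidable c] (fr : List Int) (a b : Int) :
    (if c then fr ++ [a] else fr ++ [b]) = fr ++ [if c then a else b] := by
  split <;> rfl

-- ===== VERDICT (by name: the statement is the Claim_ definition above) =====
theorem solution_spec : Claim_equal_solution := by
  intro keymap targets _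
  unfold Spec_solution solution solution_alt
  simp only [PySem.List.foldl_append_singleton_eq_map, ite_append, List.nil_append,
             List.map_map]
  apply List.map_congr_left
  intro target _
  simp only [Function.comp]
  have hnum : ∀ c : Char,
      keymap.foldl (fun num key =>
        match PySem.List.index? key.toList c with
        | none => num
        | some j =>
          match num with
          | none => some (j : Int)
          | some n => if (j : Int) < n then some (j : Int) else some n) none
      = PySem.Dict.get?
          (keymap.foldl (fun d key =>
            (PySem.List.enumerate key.toList 0).foldl (fun d p =>
              match PySem.Dict.get? d p.2 with
              | none => d.insert p.2 p.1
              | some v => if p.1 < v then d.insert p.2 p.1 else d) d) PySem.Dict.empty) c := by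
    intro c
    rw [aNum_eq, get?_bestFold, PySem.Dict.get?_empty]
  simp only [hnum]
  exact per_target _ target.toList
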